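-- pv_equiv track=rewrite | github.com/FarahAwadalla/Regex-to-NFA- | parser.py | get_last_token
-- ===== SOURCE A (Python) =====
-- def get_last_token(expr):
--     """Returns (token_string, start_index) of the last atom in expr."""
--     if not expr:
--         return '', 0
--     if expr[-1] == ')':
--         # walk back to matching '('
--         depth = 0
--         for i in range(len(expr) - 1, -1, -1):
--             if expr[i] == ')':
--                 depth += 1
--             elif expr[i] == '(':
--                 depth -= 1
--                 if depth == 0:
--                     return expr[i:], i
--     else:
--         # single character token (including ε)
--         return expr[-1], len(expr) - 1
-- ===== SOURCE B (Python) =====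
-- def get_last_token(expr):
--     """Returns (token_string, start_index) of the last atom in expr."""
--     if not expr:
--         return '', 0
--     last = len(expr) - 1
--     if expr[last] != ')':
--         return expr[last], last
--     # single forward pass: stack of indices of unmatched '('
--     stack = []
--     match = None
--     for i, ch in enumerate(expr):
--         if ch == '(':
--             stack.append(i)
--         elif ch == ')':
--             if stack:
--                 j = stack.pop()
--                 if i == last:
--                     match = j
--     if match is None:
--         return None
--     return expr[match:], match
-- ===== Notes on version B (the rewrite author's own statement) =====
-- stated objective: alternative
-- what changed: A walks backward from the end with a depth counter to find the '(' matching the trailing ')'; B makes a single forward pass maintaining a stack of indices of unmatched '(' and reads the match of the final ')' off the stack top.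
-- outside the precondition, e.g. on get_last_token('())'): A returns None, B returns None; on get_last_token(')'): A returns None, B returns None
import Mathlib
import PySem

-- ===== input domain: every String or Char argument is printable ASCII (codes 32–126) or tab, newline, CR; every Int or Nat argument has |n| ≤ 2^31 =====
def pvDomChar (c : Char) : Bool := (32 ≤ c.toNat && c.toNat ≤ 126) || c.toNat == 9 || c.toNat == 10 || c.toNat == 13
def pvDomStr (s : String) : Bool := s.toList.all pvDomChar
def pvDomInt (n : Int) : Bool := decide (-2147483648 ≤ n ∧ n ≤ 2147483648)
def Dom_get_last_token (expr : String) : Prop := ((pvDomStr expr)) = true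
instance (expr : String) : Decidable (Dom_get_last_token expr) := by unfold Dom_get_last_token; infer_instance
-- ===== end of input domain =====

-- B replaces A's backward depth-counter scan by a single forward pass with a stack of '(' indices (alternative decomposition, same cost).

-- ===== PORT A =====
-- A's backward loop `for i in range(len(expr)-1,-1,-1)`; `none` = loop fell through (Python returns None there; excluded by Pre_)
def getLastTokenLoopA (l : List Char) : Nat → Int → Option (String × Int)
  | i, depth =>
    if l.getD i ' ' = ')' then
      match i with
      | 0 => none
      | i' + 1 => getLastTokenLoopA l i' (depth + 1)
    else if l.getD i ' ' = '(' then
      if depth - 1 = 0 then some (String.mk (l.drop i), (i : Int))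
      else match i with
        | 0 => none
        | i' + 1 => getLastTokenLoopA l i' (depth - 1)
    else
      match i with
      | 0 => none
      | i' + 1 => getLastTokenLoopA l i' depth

def get_last_token (expr : String) : String × Int :=
  let l := expr.toList
  if l = [] then ("", 0)
  else if l.getD (l.length - 1) ' ' = ')' then
    match getLastTokenLoopA l (l.length - 1) 0 with
    | some r => r
    | none => ("", 0)   -- Python A returns None here (loop falls through); Pre_ excludes these inputs
  else (String.mk [l.getD (l.length - 1) ' '], ((l.length : Int) - 1))

-- ===== PORT B =====
-- one step of B's forward loop; the Lean list head is the Python list end (stack top)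
def getLastTokenStepB (last : Int) (st : List Int × Option Int) (p : Int × Char) : List Int × Option Int :=
  if p.2 = '(' then (p.1 :: st.1, st.2)
  else if p.2 = ')' then
    match st.1 with
    | [] => st
    | j :: rest => (rest, if p.1 = last then some j else st.2)
  else st

def get_last_token_alt (expr : String) : String × Int :=
  let l := expr.toList
  if l = [] then ("", 0)
  else
    let last : Int := (l.length : Int) - 1
    if l.getD (l.length - 1) ' ' ≠ ')' then (String.mk [l.getD (l.length - 1) ' '], last)
    else
      let r := (PySem.List.enumerate l 0).foldl (getLastTokenStepB last) ([], none)
      match r.2 with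
      | some j => (String.mk (l.drop j.toNat), j)
      | none => ("", 0)   -- Python B returns None here; Pre_ excludes these inputs

-- ===== PRECONDITION & SPEC =====
-- Pre_ excludes exactly the inputs ending in ')' whose final ')' has no matching '(' : there Python A's
-- loop falls through and the function returns None, not a (str, int) pair (B returns None there as well).
def Pre_get_last_token (expr : String) : Prop :=
  expr.toList = [] ∨ expr.toList.getD (expr.toList.length - 1) ' ' ≠ ')' ∨
    ∃ j < expr.toList.length, expr.toList.getD j ' ' = '(' ∧
      (expr.toList.drop j).count ')' = (expr.toList.drop j).count '('
instance (expr : String) : Decidable (Pre_get_last_token expr) := by unfold Pre_get_last_token; infer_instance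
def pvWitness_get_last_token : String := "(a|b)"
def Spec_get_last_token (expr : String) (out : String × Int) : Prop := out = get_last_token_alt expr
instance (expr : String) (out : String × Int) : Decidable (Spec_get_last_token expr out) := by unfold Spec_get_last_token; infer_instance

-- ===== CLAIM (what is proved, stated in full; the proofs are below) =====
def Claim_equal_get_last_token : Prop := ∀ (expr : String), Dom_get_last_token expr → Pre_get_last_token expr → Spec_get_last_token expr (get_last_token expr)

-- ===== LEMMAS AND PROOFS =====

-- stack of indices of unmatched '(' produced by scanning a chunk forward, first index = s
def pvStkFrom : List Char → Int → List Int → List Int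
  | [], _, st => st
  | c :: cs, s, st =>
      pvStkFrom cs (s + 1) (if c = '(' then s :: st else if c = ')' then st.tail else st)

theorem pvStkFrom_append (xs ys : List Char) (s : Int) (st : List Int) :
    pvStkFrom (xs ++ ys) s st = pvStkFrom ys (s + xs.length) (pvStkFrom xs s st) := by
  induction xs generalizing s st with
  | nil => simp [pvStkFrom]
  | cons c cs ih =>
      simp only [List.cons_append, pvStkFrom, ih, List.length_cons]
      congr 1
      push_cast
      ring

-- stack after the first k characters of l
def pvStk (l : List Char) : Nat → List Int
  | 0 => []
  | k + 1 =>
      let st := pvStk l k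
      if l.getD k ' ' = '(' then (k : Int) :: st
      else if l.getD k ' ' = ')' then st.tail else st

theorem pvStk_eq_stkFrom (l : List Char) (k : Nat) (hk : k ≤ l.length) :
    pvStkFrom (l.take k) 0 [] = pvStk l k := by
  induction k with
  | zero => simp [pvStkFrom, pvStk]
  | succ k ih =>
      have hk' : k ≤ l.length := Nat.le_of_succ_le hk
      have hklt : k < l.length := hk
      have htake : l.take (k + 1) = l.take k ++ [l[k]] := by
        rw [List.take_add_one, List.getElem?_eq_getElem hklt]; rfl
      have hgetD : l.getD k ' ' = l[k] := by
        simp [List.getD, List.getElem?_eq_getElem hklt]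
      rw [htake, pvStkFrom_append, ih hk']
      simp only [pvStkFrom, pvStk, List.length_take, Nat.min_eq_left hk', hgetD, zero_add]

-- unfolding lemma for pvStk, with List.getD normalised to getElem?
theorem pvStk_succ (l : List Char) (k : Nat) :
    pvStk l (k + 1) =
      if (l[k]?).getD ' ' = '(' then (k : Int) :: pvStk l k
      else if (l[k]?).getD ' ' = ')' then (pvStk l k).tail else pvStk l k := by
  simp only [pvStk, List.getD_eq_getElem?_getD]

-- the backward depth-counter scan reads off the (depth-1)-th element of the forward stack
theorem pvBridge (l : List Char) :
    ∀ i, i < l.length → ∀ d : Int, 1 ≤ d →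
      getLastTokenLoopA l i d =
        ((pvStk l (i + 1))[(d - 1).toNat]?).map
          (fun j => (String.mk (l.drop j.toNat), j)) := by
  intro i
  induction i with
  | zero =>
      intro _ d hd
      have h0 : pvStk l 0 = [] := rfl
      rw [getLastTokenLoopA, pvStk_succ]
      simp only [List.getD_eq_getElem?_getD]
      by_cases h1 : (l[0]?).getD ' ' = ')'
      · rw [if_pos h1]
        simp [h0, h1]
      · rw [if_neg h1]
        by_cases h2 : (l[0]?).getD ' ' = '('
        · rw [if_pos h2]
          by_cases h3 : d - 1 = 0
          · rw [if_pos h3]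
            have ht : (d - 1).toNat = 0 := by omega
            simp [h0, h2, ht]
          · rw [if_neg h3]
            have ht : ∃ m, (d - 1).toNat = m + 1 := ⟨(d - 1).toNat - 1, by omega⟩
            obtain ⟨m, hm⟩ := ht
            simp [h0, h2, hm]
        · rw [if_neg h2]
          simp [h0, h1, h2]
  | succ i ih =>
      intro hlt d hd
      have hlt' : i < l.length := Nat.lt_of_succ_lt hlt
      rw [getLastTokenLoopA, pvStk_succ]
      simp only [List.getD_eq_getElem?_getD]
      by_cases h1 : (l[i + 1]?).getD ' ' = ')'
      · have h2 : ¬ (l[i + 1]?).getD ' ' = '(' := by simp [h1]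
        rw [if_pos h1, if_neg h2, if_pos h1]
        rw [ih hlt' (d + 1) (by omega)]
        have ht : (d + 1 - 1).toNat = (d - 1).toNat + 1 := by omega
        rw [ht]
        cases pvStk l (i + 1) with
        | nil => simp
        | cons a t => simp
      · by_cases h2 : (l[i + 1]?).getD ' ' = '('
        · rw [if_neg h1, if_pos h2, if_pos h2]
          by_cases h3 : d - 1 = 0
          · rw [if_pos h3]
            have ht : (d - 1).toNat = 0 := by omega
            simp [ht]
          · rw [if_neg h3]
            rw [ih hlt' (d - 1) (by omega)]
            have ht : (d - 1).toNat = (d - 1 - 1).toNat + 1 := by omega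
            rw [ht, List.getElem?_cons_succ]
        · rw [if_neg h1, if_neg h2, if_neg h2, if_neg h1]
          rw [ih hlt' d hd]

-- folding B's step over an enumerated chunk whose indices all stay below `last`
theorem pvFoldPrefix (last : Int) :
    ∀ (xs : List Char) (s : Int) (st : List Int),
      s + xs.length ≤ last →
      (PySem.List.enumerate xs s).foldl (getLastTokenStepB last) (st, none) =
        (pvStkFrom xs s st, none) := by
  intro xs
  induction xs with
  | nil => intro s st _; simp [PySem.List.enumerate_nil, pvStkFrom]
  | cons c cs ih =>
      intro s st hle
      have hs : s ≠ last := by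
        simp only [List.length_cons] at hle; push_cast at hle
        have : (0 : Int) ≤ (cs.length : Int) := by positivity
        omega
      rw [PySem.List.enumerate_cons, List.foldl_cons]
      have hstep : getLastTokenStepB last (st, none) (s, c) =
          ((if c = '(' then s :: st else if c = ')' then st.tail else st), none) := by
        by_cases h1 : c = '('
        · simp [getLastTokenStepB, h1]
        · by_cases h2 : c = ')'
          · cases st with
            | nil => simp [getLastTokenStepB, h2, List.tail]
            | cons a t => simp [getLastTokenStepB, h2, hs]
          · simp [getLastTokenStepB, h1, h2]
      rw [hstep, ih (s + 1) _ (by simp only [List.length_cons] at hle; push_cast at hle ⊢; omega)]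
      simp [pvStkFrom]

-- the two ports agree on every input (on the excluded inputs both return the placeholder ("", 0))
theorem pvPortsEq (expr : String) : get_last_token expr = get_last_token_alt expr := by
  unfold get_last_token get_last_token_alt
  by_cases hnil : expr.toList = []
  · simp [hnil]
  · simp only [hnil, if_false]
    by_cases hlast : expr.toList.getD (expr.toList.length - 1) ' ' = ')'
    · rw [if_pos hlast, if_neg (show ¬ (expr.toList.getD (expr.toList.length - 1) ' ' ≠ ')') from fun hne => hne hlast)]
      set l := expr.toList with hl
      have hn : 0 < l.length := List.length_pos_iff.mpr hnil
      have hlt : l.length - 1 < l.length := by omega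
      have htake : l = l.take (l.length - 1) ++ [l[l.length - 1]] := by
        conv_lhs => rw [← List.dropLast_concat_getLast hnil]
        rw [List.dropLast_eq_take, List.getLast_eq_getElem]
      have hgetD : l.getD (l.length - 1) ' ' = l[l.length - 1] := by
        simp [List.getD, List.getElem?_eq_getElem hlt]
      have hclose : l[l.length - 1] = ')' := by rw [← hgetD]; exact hlast
      have hlen_take : (l.take (l.length - 1)).length = l.length - 1 :=
        List.length_take_of_le (by omega)
      have hcast : ((l.length - 1 : Nat) : Int) = (l.length : Int) - 1 := by omega
      have henum : PySem.List.enumerate l 0 =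
          PySem.List.enumerate (l.take (l.length - 1)) 0 ++
            [(((l.length - 1 : Nat) : Int), ')')] := by
        conv_lhs => rw [htake]
        rw [PySem.List.enumerate_append]
        simp [hlen_take, PySem.List.enumerate_cons, PySem.List.enumerate_nil, hclose]
      have hB :
          (PySem.List.enumerate l 0).foldl (getLastTokenStepB ((l.length : Int) - 1)) ([], none) =
            getLastTokenStepB ((l.length : Int) - 1) (pvStk l (l.length - 1), none)
              (((l.length - 1 : Nat) : Int), ')') := by
        rw [henum, List.foldl_append,
          pvFoldPrefix _ _ _ _ (by simp only [hlen_take]; omega),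
          pvStk_eq_stkFrom l (l.length - 1) (by omega)]
        simp
      rw [hB]
      have hc := hlast
      rw [hl] at hc
      cases hi : l.length - 1 with
      | zero =>
          rw [getLastTokenLoopA]
          rw [hi] at hc
          rw [if_pos hc]
          have hst : pvStk l 0 = [] := rfl
          simp [getLastTokenStepB, hst, hcast]
      | succ i' =>
          rw [getLastTokenLoopA]
          rw [hi] at hc
          rw [if_pos hc]
          rw [show (0 : Int) + 1 = 1 by norm_num]
          rw [pvBridge l i' (by omega) 1 le_rfl]
          rw [show i' + 1 = l.length - 1 from hi.symm]
          cases hst : pvStk l (l.length - 1) with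
          | nil => simp [getLastTokenStepB, hst, hcast]
          | cons j rest => simp [getLastTokenStepB, hst, hcast]
    · rw [if_neg hlast, if_pos hlast]

-- ===== VERDICT (by name: the statement is the Claim_ definition above) =====
theorem get_last_token_spec : Claim_equal_get_last_token := by
  intro expr _ _
  unfold Spec_get_last_token
  exact pvPortsEq expr
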